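-- pv_equiv track=rewrite | github.com/qrowned/aoc2025 | day-7.py | simulate_beam_splitting
-- ===== SOURCE A (Python) =====
-- def get_start_position(matrix):
--     for row in range(len(matrix)):
--         for col in range(len(matrix[row])):
--             if matrix[row][col] == 'S':
--                 return row, col
--     return None
--
-- def simulate_beam_splitting(matrix):
--     start_row, start_col = get_start_position(matrix)
--     if start_row is None:
--         return 0
--
--     # Track active beam positions (columns that have active beams at each row)
--     # We'll process row by row
--     split_count = 0
--
--     # Start with one beam at the start position
--     active_beams = {start_col}  # Set of columns with active beams
--
--     # Process each row from start_row + 1 to the end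
--     for row in range(start_row + 1, len(matrix)):
--         next_row_beams = set()
--
--         # For each active beam column, check what's in the next row
--         for col in active_beams:
--             # Check if we're still within bounds
--             if col < 0 or col >= len(matrix[row]):
--                 continue
--
--             # Check what's at this position in the current row
--             if matrix[row][col] == '^':
--                 # Hit a splitter - beam stops, create two new beams
--                 split_count += 1
--
--                 # Create beams at left and right positions
--                 left_col = col - 1
--                 right_col = col + 1
--
--                 # Add to next row if within bounds
--                 if left_col >= 0:
--                     next_row_beams.add(left_col)
--                 if right_col < len(matrix[row]):
--                     next_row_beams.add(right_col)
--             elif matrix[row][col] == '.':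
--                 # Empty space - beam continues downward
--                 next_row_beams.add(col)
--
--         # Update active beams for next iteration
--         active_beams = next_row_beams
--
--         # If no active beams, we're done
--         if not active_beams:
--             break
--
--     return split_count
-- ===== SOURCE B (Python) =====
-- def simulate_beam_splitting(matrix):
--     # Bitmask re-implementation: each row's beam frontier is one Python int
--     # (bit c set = active beam in column c); splitter/dot columns of a row are
--     # packed into masks once, and the whole frontier advances with shifts/ANDs.
--     start = None
--     r = 0
--     for row in matrix:
--         if 'S' in row:
--             start = (r, row.index('S'))
--             break
--         r += 1
--     start_row, start_col = start  # no 'S' -> TypeError, same domain as the original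
--     splits = 0
--     mask = 1 << start_col
--     for r in range(start_row + 1, len(matrix)):
--         if mask == 0:
--             break
--         row = matrix[r]
--         splitters = 0
--         dots = 0
--         bit = 1
--         for cell in row:
--             if cell == '^':
--                 splitters |= bit
--             elif cell == '.':
--                 dots |= bit
--             bit <<= 1
--         hit = mask & splitters
--         splits += hit.bit_count()
--         mask = (hit >> 1) | ((hit << 1) & ((1 << len(row)) - 1)) | (mask & dots)
--     return splits
-- ===== Notes on version B (the rewrite author's own statement) =====
-- stated objective: alternative
-- what changed: A carries the active beams as a per-row Python set and loops over its members with per-element bounds/branch checks; B packs each row's frontier into a single integer bitmask and one splitter/dot mask per row, advancing the whole frontier at once with shifts/AND/OR and counting splitter hits with popcount.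
import Mathlib
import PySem

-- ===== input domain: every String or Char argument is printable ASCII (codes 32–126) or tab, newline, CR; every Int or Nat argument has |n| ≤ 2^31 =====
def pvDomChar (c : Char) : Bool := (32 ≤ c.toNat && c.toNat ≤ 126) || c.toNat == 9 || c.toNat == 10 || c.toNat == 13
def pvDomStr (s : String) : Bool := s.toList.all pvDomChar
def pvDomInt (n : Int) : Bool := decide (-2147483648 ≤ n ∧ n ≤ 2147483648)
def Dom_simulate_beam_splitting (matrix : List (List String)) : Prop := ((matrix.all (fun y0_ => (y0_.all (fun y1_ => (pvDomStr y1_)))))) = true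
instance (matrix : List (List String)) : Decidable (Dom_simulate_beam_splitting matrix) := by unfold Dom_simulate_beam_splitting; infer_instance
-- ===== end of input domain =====

-- B replaces A's per-row set of beam columns by a single bitmask integer advanced
-- with shifts/ANDs (alternative data structure; same row-by-row semantics).

-- ===== PORT A =====

-- matrix[r][c] under guards that guarantee the indices are in range
def pvCell (row : List String) (c : Int) : String := (PySem.List.pyGet? row c).getD ""

-- get_start_position: inner loop 'for col in range(len(matrix[row]))'
def pvFindRowA : List String → Int → Option Int
  | [], _ => none
  | s :: rest, c => if s = "S" then some c else pvFindRowA rest (c + 1)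

-- get_start_position: outer loop 'for row in range(len(matrix))'
def pvFindA : List (List String) → Int → Option (Int × Int)
  | [], _ => none
  | row :: rest, r =>
    match pvFindRowA row 0 with
    | some c => some (r, c)
    | none => pvFindA rest (r + 1)

-- body of 'for col in active_beams' (state = (split_count, next_row_beams))
def pvStepA (row : List String) (st : Int × PySem.Set Int) (col : Int) : Int × PySem.Set Int :=
  if col < 0 ∨ (row.length : Int) ≤ col then st
  else if pvCell row col = "^" then
    let st1 : Int × PySem.Set Int := (st.1 + 1, st.2)
    let st2 : Int × PySem.Set Int :=
      if 0 ≤ col - 1 then (st1.1, PySem.Set.add st1.2 (col - 1)) else st1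
    if col + 1 < (row.length : Int) then (st2.1, PySem.Set.add st2.2 (col + 1)) else st2
  else if pvCell row col = "." then (st.1, PySem.Set.add st.2 col)
  else st

-- one row: fold the step over the active beams (next_row_beams starts empty)
def pvRowA (row : List String) (cnt : Int) (beams : PySem.Set Int) : Int × PySem.Set Int :=
  beams.foldl (pvStepA row) (cnt, PySem.Set.empty)

-- 'for row in range(start_row + 1, len(matrix))' with the break on empty beams
def pvLoopA (matrix : List (List String)) : List Int → Int → PySem.Set Int → Int
  | [], cnt, _ => cnt
  | r :: rs, cnt, beams =>
    let res := pvRowA ((PySem.List.pyGet? matrix r).getD []) cnt beams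
    if res.2.isEmpty then res.1 else pvLoopA matrix rs res.1 res.2

def simulate_beam_splitting (matrix : List (List String)) : Int :=
  match pvFindA matrix 0 with
  | none => 0   -- unreachable under Pre_: Python raises TypeError unpacking None here
  | some (r, c) =>
    pvLoopA matrix (PySem.List.pyRange (r + 1) (matrix.length : Int) 1) 0 (PySem.Set.ofList [c])

-- ===== PORT B =====

-- B's start scan: membership test + list.index per row
def pvFindB : List (List String) → Int → Option (Int × Int)
  | [], _ => none
  | row :: rest, r =>
    -- row.index('S') is guarded by 'S' ∈ row, so index? is always some here
    if "S" ∈ row then some (r, (((PySem.List.index? row "S").getD 0 : Nat) : Int))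
    else pvFindB rest (r + 1)

-- 'for cell in row' building (splitters, dots, bit); Python ints stay nonnegative here
def pvMasksB (row : List String) : Nat × Nat × Nat :=
  row.foldl
    (fun (st : Nat × Nat × Nat) cell =>
      if cell = "^" then (st.1 ||| st.2.2, st.2.1, st.2.2 <<< 1)
      else if cell = "." then (st.1, st.2.1 ||| st.2.2, st.2.2 <<< 1)
      else (st.1, st.2.1, st.2.2 <<< 1))
    (0, 0, 1)

-- 'for r in range(start_row + 1, len(matrix))' over (splits, mask)
def pvLoopB (matrix : List (List String)) : List Int → Int → Nat → Int
  | [], splits, _ => splits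
  | r :: rs, splits, mask =>
    if mask = 0 then splits
    else
      let row := (PySem.List.pyGet? matrix r).getD []
      let ms := pvMasksB row
      let hit := mask &&& ms.1
      pvLoopB matrix rs (splits + (PySem.Int.bitCount (hit : Int) : Int))
        ((hit >>> 1) ||| ((hit <<< 1) &&& ((1 <<< row.length) - 1)) ||| (mask &&& ms.2.1))

def simulate_beam_splitting_alt (matrix : List (List String)) : Int :=
  match pvFindB matrix 0 with
  | none => 0   -- unreachable under Pre_: Python B raises TypeError unpacking None here
  | some (r, c) =>
    -- c ≥ 0 always (column index), so '1 << c' is faithfully '1 <<< c.toNat'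
    pvLoopB matrix (PySem.List.pyRange (r + 1) (matrix.length : Int) 1) 0 (1 <<< c.toNat)

-- ===== PRECONDITION & SPEC =====

-- Pre_ excludes matrices with no 'S' cell: there A's 'start_row, start_col = None' raises TypeError.
def Pre_simulate_beam_splitting (matrix : List (List String)) : Prop :=
  ∃ row ∈ matrix, "S" ∈ row
instance (matrix : List (List String)) : Decidable (Pre_simulate_beam_splitting matrix) := by
  unfold Pre_simulate_beam_splitting; infer_instance

def pvWitness_simulate_beam_splitting : List (List String) := [["S"]]

def Spec_simulate_beam_splitting (matrix : List (List String)) (out : Int) : Prop := out = simulate_beam_splitting_alt matrix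
instance (matrix : List (List String)) (out : Int) : Decidable (Spec_simulate_beam_splitting matrix out) := by unfold Spec_simulate_beam_splitting; infer_instance

-- ===== CLAIM (what is proved, stated in full; the proofs are below) =====
def Claim_equal_simulate_beam_splitting : Prop := ∀ (matrix : List (List String)), Dom_simulate_beam_splitting matrix → Pre_simulate_beam_splitting matrix → Spec_simulate_beam_splitting matrix (simulate_beam_splitting matrix)


-- ===== LEMMAS AND PROOFS =====

-- Bool guards matching pvStepA's branches
def pvHitB (row : List String) (c : Int) : Bool :=
  !(decide (c < 0) || decide ((row.length : Int) ≤ c)) && decide (pvCell row c = "^")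
def pvDotB (row : List String) (c : Int) : Bool :=
  !(decide (c < 0) || decide ((row.length : Int) ≤ c)) && !(decide (pvCell row c = "^")) && decide (pvCell row c = ".")

-- one beam at column c yields a beam at column x in the next row
def pvTrans (row : List String) (c x : Int) : Prop :=
  (pvHitB row c = true ∧ ((x = c - 1 ∧ 1 ≤ c) ∨ (x = c + 1 ∧ c + 1 < (row.length : Int))))
  ∨ (x = c ∧ pvDotB row c = true)

-- invariant tying A's beam set to B's bitmask
def pvInv (beams : List Int) (mask : Nat) : Prop :=
  beams.Nodup ∧ (∀ c ∈ beams, 0 ≤ c) ∧ (∀ n : Nat, mask.testBit n = true ↔ (n : Int) ∈ beams)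

lemma pvCell_natCast (row : List String) (n : Nat) : pvCell row (n : Int) = row.getD n "" := by
  show PySem.List.pyGetD row (n : Int) "" = row.getD n ""
  exact PySem.List.pyGetD_natCast row n ""

lemma pvFindRowA_eq_index? (row : List String) :
    ∀ k : Int, pvFindRowA row k = (PySem.List.index? row "S").map (fun n : Nat => k + (n : Int)) := by
  induction row with
  | nil => intro k; rfl
  | cons s rest ih =>
    intro k
    by_cases hs : s = "S"
    · subst hs
      rw [PySem.List.index?_cons_self]
      simp [pvFindRowA]
    · rw [PySem.List.index?_cons_of_ne rest hs]
      simp only [pvFindRowA, if_neg hs, ih (k + 1)]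
      cases h : PySem.List.index? rest "S" with
      | none => simp
      | some n => simp; ring

lemma pvFindB_eq (m : List (List String)) : ∀ r, pvFindB m r = pvFindA m r := by
  induction m with
  | nil => intro r; rfl
  | cons row rest ih =>
    intro r
    by_cases hmem : "S" ∈ row
    · have hsome : (PySem.List.index? row "S").isSome :=
        (PySem.List.index?_isSome_iff row "S").mpr hmem
      obtain ⟨n, hn⟩ := Option.isSome_iff_exists.mp hsome
      simp only [pvFindB, pvFindA, if_pos hmem, pvFindRowA_eq_index? row 0, hn]
      simp
    · have hnone : PySem.List.index? row "S" = none :=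
        (PySem.List.index?_eq_none_iff row "S").mpr hmem
      simp only [pvFindB, pvFindA, if_neg hmem, pvFindRowA_eq_index? row 0, hnone]
      simp only [Option.map_none]
      exact ih (r + 1)

lemma pvFindRowA_le (row : List String) : ∀ k c, pvFindRowA row k = some c → k ≤ c := by
  induction row with
  | nil => intro k c h; simp [pvFindRowA] at h
  | cons s rest ih =>
    intro k c h
    simp only [pvFindRowA] at h
    split at h
    · simp at h; omega
    · have := ih (k + 1) c h; omega


lemma pvFindA_col_nonneg (m : List (List String)) : ∀ r p c, pvFindA m r = some (p, c) → 0 ≤ c := by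
  induction m with
  | nil => intro r p c h; simp [pvFindA] at h
  | cons row rest ih =>
    intro r p c h
    simp only [pvFindA] at h
    cases hr : pvFindRowA row 0 with
    | some c0 =>
      rw [hr] at h
      have := pvFindRowA_le row 0 c0 hr
      simp at h; omega
    | none => rw [hr] at h; exact ih (r + 1) p c h

-- proof-side name for pvMasksB's fold step
def pvMB (st : Nat × Nat × Nat) (cell : String) : Nat × Nat × Nat :=
  if cell = "^" then (st.1 ||| st.2.2, st.2.1, st.2.2 <<< 1)
  else if cell = "." then (st.1, st.2.1 ||| st.2.2, st.2.2 <<< 1)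
  else (st.1, st.2.1, st.2.2 <<< 1)

lemma pvMasksB_eq_foldl (row : List String) : pvMasksB row = row.foldl pvMB (0, 0, 1) := rfl

lemma pvMB_aux (row : List String) : ∀ s d k : Nat, s < 2 ^ k → d < 2 ^ k →
    (row.foldl pvMB (s, d, 2 ^ k)).1 < 2 ^ (k + row.length)
    ∧ (row.foldl pvMB (s, d, 2 ^ k)).2.1 < 2 ^ (k + row.length)
    ∧ (∀ n : Nat, (row.foldl pvMB (s, d, 2 ^ k)).1.testBit n = true ↔
        (s.testBit n = true ∨ (k ≤ n ∧ n - k < row.length ∧ row.getD (n - k) "" = "^")))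
    ∧ (∀ n : Nat, (row.foldl pvMB (s, d, 2 ^ k)).2.1.testBit n = true ↔
        (d.testBit n = true ∨ (k ≤ n ∧ n - k < row.length ∧ row.getD (n - k) "" = "."))) := by
  induction row with
  | nil =>
    intro s d k hs hd
    refine ⟨by simpa using hs, by simpa using hd, fun n => ?_, fun n => ?_⟩ <;>
      simp [List.foldl_nil]
  | cons cell rest ih =>
    intro s d k hs hd
    have hb : (2 ^ k) <<< 1 = 2 ^ (k + 1) := by
      rw [Nat.shiftLeft_eq]; ring
    have hkk : 2 ^ k < 2 ^ (k + 1) := Nat.pow_lt_pow_right (by norm_num) (Nat.lt_succ_self k)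
    have hsk : s < 2 ^ (k + 1) := lt_trans hs hkk
    have hdk : d < 2 ^ (k + 1) := lt_trans hd hkk
    have elen : k + 1 + rest.length = k + (cell :: rest).length := by
      simp [List.length_cons]; omega
    by_cases hc : cell = "^"
    · have hfold : (cell :: rest).foldl pvMB (s, d, 2 ^ k)
          = rest.foldl pvMB (s ||| 2 ^ k, d, 2 ^ (k + 1)) := by
        simp [pvMB, hc, hb]
      rw [hfold]
      obtain ⟨ihs, ihd, ihts, ihtd⟩ := ih (s ||| 2 ^ k) d (k + 1) (Nat.or_lt_two_pow hsk hkk) hdk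
      rw [elen] at ihs ihd
      refine ⟨ihs, ihd, fun n => ?_, fun n => ?_⟩
      · rw [ihts n, Nat.testBit_lor, Nat.testBit_two_pow]
        constructor
        · rintro (hsb | ⟨hkn, hlt, hg⟩)
          · rcases Bool.or_eq_true_iff.mp hsb with h | h
            · exact Or.inl h
            · have hnk : n = k := by have := of_decide_eq_true h; omega
              refine Or.inr ⟨by omega, by simp [List.length_cons]; omega, ?_⟩
              simp [hnk, hc]
          · refine Or.inr ⟨by omega, by simp [List.length_cons] at hlt ⊢; omega, ?_⟩
            have e : n - k = (n - (k + 1)) + 1 := by omega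
            rw [e, List.getD_cons_succ]; exact hg
        · rintro (hsb | ⟨hkn, hlt, hg⟩)
          · exact Or.inl (by simp [hsb])
          · by_cases hnk : n = k
            · exact Or.inl (by simp [hnk])
            · refine Or.inr ⟨by omega, by simp [List.length_cons] at hlt ⊢; omega, ?_⟩
              have e : n - k = (n - (k + 1)) + 1 := by omega
              rw [e, List.getD_cons_succ] at hg; exact hg
      · rw [ihtd n]
        constructor
        · rintro (hdb | ⟨hkn, hlt, hg⟩)
          · exact Or.inl hdb
          · refine Or.inr ⟨by omega, by simp [List.length_cons] at hlt ⊢; omega, ?_⟩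
            have e : n - k = (n - (k + 1)) + 1 := by omega
            rw [e, List.getD_cons_succ]; exact hg
        · rintro (hdb | ⟨hkn, hlt, hg⟩)
          · exact Or.inl hdb
          · by_cases hnk : n = k
            · exfalso; rw [hnk] at hg; simp [hc] at hg
            · refine Or.inr ⟨by omega, by simp [List.length_cons] at hlt ⊢; omega, ?_⟩
              have e : n - k = (n - (k + 1)) + 1 := by omega
              rw [e, List.getD_cons_succ] at hg; exact hg
    · by_cases hcd : cell = "."
      · have hfold : (cell :: rest).foldl pvMB (s, d, 2 ^ k)
            = rest.foldl pvMB (s, d ||| 2 ^ k, 2 ^ (k + 1)) := by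
          simp [pvMB, hc, hcd, hb]
        rw [hfold]
        obtain ⟨ihs, ihd, ihts, ihtd⟩ := ih s (d ||| 2 ^ k) (k + 1) hsk (Nat.or_lt_two_pow hdk hkk)
        rw [elen] at ihs ihd
        refine ⟨ihs, ihd, fun n => ?_, fun n => ?_⟩
        · rw [ihts n]
          constructor
          · rintro (hsb | ⟨hkn, hlt, hg⟩)
            · exact Or.inl hsb
            · refine Or.inr ⟨by omega, by simp [List.length_cons] at hlt ⊢; omega, ?_⟩
              have e : n - k = (n - (k + 1)) + 1 := by omega
              rw [e, List.getD_cons_succ]; exact hg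
          · rintro (hsb | ⟨hkn, hlt, hg⟩)
            · exact Or.inl hsb
            · by_cases hnk : n = k
              · exfalso; rw [hnk] at hg; simp [hc] at hg
              · refine Or.inr ⟨by omega, by simp [List.length_cons] at hlt ⊢; omega, ?_⟩
                have e : n - k = (n - (k + 1)) + 1 := by omega
                rw [e, List.getD_cons_succ] at hg; exact hg
        · rw [ihtd n, Nat.testBit_lor, Nat.testBit_two_pow]
          constructor
          · rintro (hdb | ⟨hkn, hlt, hg⟩)
            · rcases Bool.or_eq_true_iff.mp hdb with h | h
              · exact Or.inl h
              · have hnk : n = k := by have := of_decide_eq_true h; omega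
                refine Or.inr ⟨by omega, by simp [List.length_cons]; omega, ?_⟩
                simp [hnk, hcd]
            · refine Or.inr ⟨by omega, by simp [List.length_cons] at hlt ⊢; omega, ?_⟩
              have e : n - k = (n - (k + 1)) + 1 := by omega
              rw [e, List.getD_cons_succ]; exact hg
          · rintro (hdb | ⟨hkn, hlt, hg⟩)
            · exact Or.inl (by simp [hdb])
            · by_cases hnk : n = k
              · exact Or.inl (by simp [hnk])
              · refine Or.inr ⟨by omega, by simp [List.length_cons] at hlt ⊢; omega, ?_⟩
                have e : n - k = (n - (k + 1)) + 1 := by omega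
                rw [e, List.getD_cons_succ] at hg; exact hg
      · have hfold : (cell :: rest).foldl pvMB (s, d, 2 ^ k)
            = rest.foldl pvMB (s, d, 2 ^ (k + 1)) := by
          simp [pvMB, hc, hcd, hb]
        rw [hfold]
        obtain ⟨ihs, ihd, ihts, ihtd⟩ := ih s d (k + 1) hsk hdk
        rw [elen] at ihs ihd
        refine ⟨ihs, ihd, fun n => ?_, fun n => ?_⟩
        · rw [ihts n]
          constructor
          · rintro (hsb | ⟨hkn, hlt, hg⟩)
            · exact Or.inl hsb
            · refine Or.inr ⟨by omega, by simp [List.length_cons] at hlt ⊢; omega, ?_⟩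
              have e : n - k = (n - (k + 1)) + 1 := by omega
              rw [e, List.getD_cons_succ]; exact hg
          · rintro (hsb | ⟨hkn, hlt, hg⟩)
            · exact Or.inl hsb
            · by_cases hnk : n = k
              · exfalso; rw [hnk] at hg; simp [hc] at hg
              · refine Or.inr ⟨by omega, by simp [List.length_cons] at hlt ⊢; omega, ?_⟩
                have e : n - k = (n - (k + 1)) + 1 := by omega
                rw [e, List.getD_cons_succ] at hg; exact hg
        · rw [ihtd n]
          constructor
          · rintro (hdb | ⟨hkn, hlt, hg⟩)
            · exact Or.inl hdb
            · refine Or.inr ⟨by omega, by simp [List.length_cons] at hlt ⊢; omega, ?_⟩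
              have e : n - k = (n - (k + 1)) + 1 := by omega
              rw [e, List.getD_cons_succ]; exact hg
          · rintro (hdb | ⟨hkn, hlt, hg⟩)
            · exact Or.inl hdb
            · by_cases hnk : n = k
              · exfalso; rw [hnk] at hg; simp [hcd] at hg
              · refine Or.inr ⟨by omega, by simp [List.length_cons] at hlt ⊢; omega, ?_⟩
                have e : n - k = (n - (k + 1)) + 1 := by omega
                rw [e, List.getD_cons_succ] at hg; exact hg

lemma pvMasksB_spec (row : List String) :
    (pvMasksB row).1 < 2 ^ row.length
    ∧ (∀ n : Nat, (pvMasksB row).1.testBit n = true ↔ (n < row.length ∧ row.getD n "" = "^"))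
    ∧ (∀ n : Nat, (pvMasksB row).2.1.testBit n = true ↔ (n < row.length ∧ row.getD n "" = ".")) := by
  have h := pvMB_aux row 0 0 0 (by norm_num) (by norm_num)
  rw [pow_zero] at h
  rw [pvMasksB_eq_foldl]
  obtain ⟨h1, -, h3, h4⟩ := h
  refine ⟨by simpa using h1, fun n => ?_, fun n => ?_⟩
  · rw [h3 n]; simp [Nat.zero_testBit]
  · rw [h4 n]; simp [Nat.zero_testBit]

lemma bitCount_eq_countP : ∀ (B m : Nat), m < 2 ^ B →
    PySem.Int.bitCount (m : Int) = (List.range B).countP (fun n => m.testBit n) := by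
  intro B
  induction B with
  | zero =>
    intro m h
    have : m = 0 := by omega
    subst this
    simp [PySem.Int.bitCount_zero]
  | succ B ih =>
    intro m h
    by_cases hm : m = 0
    · subst hm
      simp [PySem.Int.bitCount_zero, Nat.zero_testBit]
    · have hp : 2 ^ (B + 1) = 2 ^ B * 2 := pow_succ 2 B
      have h2 : m / 2 < 2 ^ B := by omega
      rw [PySem.Int.bitCount_natCast (Nat.pos_of_ne_zero hm), ih (m / 2) h2,
        List.range_succ_eq_map, List.countP_cons]
      have hcomp : ((List.range B).map Nat.succ).countP (fun n => m.testBit n)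
          = (List.range B).countP (fun n => (m / 2).testBit n) := by
        rw [List.countP_map]
        congr 1
        funext n
        simp [Function.comp, Nat.testBit_succ]
      rw [hcomp, Nat.testBit_zero]
      rcases Nat.mod_two_eq_zero_or_one m with h0 | h0 <;> simp [h0] <;> omega

lemma pvStepA_fst (row : List String) (acc : Int × PySem.Set Int) (c : Int) :
    (pvStepA row acc c).1 = acc.1 + (if pvHitB row c = true then 1 else 0) := by
  simp only [pvStepA, pvHitB]
  split_ifs <;> simp_all <;> omega

lemma pvStepA_mem (row : List String) (acc : Int × PySem.Set Int) (c x : Int) :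
    x ∈ (pvStepA row acc c).2 ↔ x ∈ acc.2 ∨ pvTrans row c x := by
  by_cases h1 : c < 0 ∨ (row.length : Int) ≤ c
  · have hH : ¬ pvHitB row c = true := by simp [pvHitB]; omega
    have hD : ¬ pvDotB row c = true := by simp [pvDotB]; omega
    simp [pvStepA, h1, pvTrans, hH, hD]
  · by_cases h2 : pvCell row c = "^"
    · have hH : pvHitB row c = true := by simp [pvHitB, h2]; omega
      have hD : ¬ pvDotB row c = true := by simp [pvDotB, h2]
      by_cases h3 : 0 ≤ c - 1 <;> by_cases h4 : c + 1 < (row.length : Int)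
      · have e1 : (1 : Int) ≤ c := by omega
        simp [pvStepA, h1, h2, h3, h4, pvTrans, hH, hD, e1, PySem.Set.mem_add]
        tauto
      · have e1 : (1 : Int) ≤ c := by omega
        simp [pvStepA, h1, h2, h3, h4, pvTrans, hH, hD, e1, PySem.Set.mem_add]
      · have e1 : ¬ (1 : Int) ≤ c := by omega
        simp [pvStepA, h1, h2, h3, h4, pvTrans, hH, hD, e1, PySem.Set.mem_add]
      · have e1 : ¬ (1 : Int) ≤ c := by omega
        simp [pvStepA, h1, h2, h3, h4, pvTrans, hH, hD, e1, PySem.Set.mem_add]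
    · by_cases h5 : pvCell row c = "."
      · have hH : ¬ pvHitB row c = true := by simp [pvHitB, h2]
        have hD : pvDotB row c = true := by simp [pvDotB, h2, h5]; omega
        simp [pvStepA, h1, h2, h5, pvTrans, hH, hD, PySem.Set.mem_add]
      · have hH : ¬ pvHitB row c = true := by simp [pvHitB, h2]
        have hD : ¬ pvDotB row c = true := by simp [pvDotB, h5]
        simp [pvStepA, h1, h2, h5, pvTrans, hH, hD]

lemma pvStepA_nodup (row : List String) (acc : Int × PySem.Set Int) (c : Int)
    (h : acc.2.Nodup) : (pvStepA row acc c).2.Nodup := by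
  simp only [pvStepA]
  split_ifs <;> simp_all [PySem.Set.nodup_add]

lemma pvRowA_count (row : List String) : ∀ (beams : List Int) (acc : Int × PySem.Set Int),
    (beams.foldl (pvStepA row) acc).1 = acc.1 + (beams.countP (pvHitB row) : Int) := by
  intro beams
  induction beams with
  | nil => intro acc; simp
  | cons c bs ih =>
    intro acc
    simp only [List.foldl_cons, ih, pvStepA_fst, List.countP_cons]
    push_cast
    split_ifs <;> simp_all <;> ring

lemma pvRowA_mem (row : List String) : ∀ (beams : List Int) (acc : Int × PySem.Set Int) (x : Int),
    x ∈ (beams.foldl (pvStepA row) acc).2 ↔ x ∈ acc.2 ∨ ∃ c ∈ beams, pvTrans row c x := by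
  intro beams
  induction beams with
  | nil => intro acc x; simp
  | cons c bs ih =>
    intro acc x
    simp only [List.foldl_cons, ih, pvStepA_mem, List.mem_cons]
    constructor
    · rintro ((h | h) | ⟨c', hc', ht⟩)
      · exact Or.inl h
      · exact Or.inr ⟨c, Or.inl rfl, h⟩
      · exact Or.inr ⟨c', Or.inr hc', ht⟩
    · rintro (h | ⟨c', (rfl | hc'), ht⟩)
      · exact Or.inl (Or.inl h)
      · exact Or.inl (Or.inr ht)
      · exact Or.inr ⟨c', hc', ht⟩

lemma pvRowA_nodup (row : List String) : ∀ (beams : List Int) (acc : Int × PySem.Set Int),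
    acc.2.Nodup → (beams.foldl (pvStepA row) acc).2.Nodup := by
  intro beams
  induction beams with
  | nil => intro acc h; exact h
  | cons c bs ih =>
    intro acc h
    exact ih _ (pvStepA_nodup row acc c h)

lemma pvTrans_nonneg (row : List String) (c x : Int) (h : pvTrans row c x) : 0 ≤ x := by
  rcases h with ⟨hh, (⟨rfl, h1⟩ | ⟨rfl, _⟩)⟩ | ⟨rfl, hd⟩
  · omega
  · simp only [pvHitB, Bool.and_eq_true, Bool.not_eq_true', decide_eq_false_iff_not,
      decide_eq_true_eq, Bool.or_eq_false_iff] at hh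
    omega
  · simp only [pvDotB, Bool.and_eq_true, Bool.not_eq_true', decide_eq_false_iff_not,
      decide_eq_true_eq, Bool.or_eq_false_iff] at hd
    omega

lemma count_eq_bitCount (row : List String) (beams : List Int) (mask : Nat) (h : pvInv beams mask) :
    beams.countP (pvHitB row) = PySem.Int.bitCount ((mask &&& (pvMasksB row).1 : Nat) : Int) := by
  obtain ⟨nd, nn, tb⟩ := h
  obtain ⟨hslt, hsbit, -⟩ := pvMasksB_spec row
  have hlt : mask &&& (pvMasksB row).1 < 2 ^ row.length :=
    lt_of_le_of_lt Nat.and_le_right hslt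
  rw [bitCount_eq_countP row.length _ hlt, List.countP_eq_length_filter,
    List.countP_eq_length_filter]
  have hinj : Function.Injective (fun n : Nat => (n : Int)) := fun a b hab => by simpa using hab
  have hperm : (beams.filter (pvHitB row)).Perm
      (((List.range row.length).filter
        (fun n => (mask &&& (pvMasksB row).1).testBit n)).map (fun n : Nat => (n : Int))) := by
    rw [List.perm_ext_iff_of_nodup (nd.filter _) (((List.nodup_range).filter _).map hinj)]
    intro x
    simp only [List.mem_filter, List.mem_map, List.mem_range, Nat.testBit_and,
      Bool.and_eq_true]
    constructor
    · rintro ⟨hxb, hhit⟩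
      have hx : (¬ x < 0 ∧ ¬ (row.length : Int) ≤ x) ∧ pvCell row x = "^" := by
        simpa [pvHitB] using hhit
      refine ⟨x.toNat, ⟨by omega, ?_, ?_⟩, by omega⟩
      · rw [tb x.toNat, Int.toNat_of_nonneg (by omega)]; exact hxb
      · rw [hsbit x.toNat]
        have hc : pvCell row ((x.toNat : Nat) : Int) = "^" := by
          rw [Int.toNat_of_nonneg (by omega)]; exact hx.2
        rw [pvCell_natCast] at hc
        exact ⟨by omega, hc⟩
    · rintro ⟨n, ⟨hn, hmb, hsb⟩, rfl⟩
      have hmem : ((n : Nat) : Int) ∈ beams := (tb n).mp hmb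
      have hs := (hsbit n).mp hsb
      refine ⟨hmem, ?_⟩
      simp only [pvHitB, Bool.and_eq_true, Bool.not_eq_true', decide_eq_true_eq,
        Bool.or_eq_false_iff, decide_eq_false_iff_not]
      rw [pvCell_natCast]
      refine ⟨⟨by omega, ?_⟩, hs.2⟩
      have := hs.1; omega
  rw [hperm.length_eq, List.length_map]

lemma pvInv_next (row : List String) (beams : List Int) (mask : Nat) (cnt : Int) (h : pvInv beams mask) :
    pvInv ((pvRowA row cnt beams).2)
      (((mask &&& (pvMasksB row).1) >>> 1) ||| (((mask &&& (pvMasksB row).1) <<< 1) &&& ((1 <<< row.length) - 1))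
        ||| (mask &&& (pvMasksB row).2.1)) := by
  rw [pvRowA]
  obtain ⟨nd, nn, tb⟩ := h
  obtain ⟨hslt, hsbit, hdbit⟩ := pvMasksB_spec row
  have hempty : (PySem.Set.empty : PySem.Set Int) = [] := rfl
  refine ⟨pvRowA_nodup row beams (cnt, PySem.Set.empty) (by rw [hempty]; exact List.nodup_nil),
    ?_, ?_⟩
  · intro c hc
    rw [pvRowA_mem] at hc
    rcases hc with hc | ⟨c', -, ht⟩
    · rw [hempty] at hc; simp at hc
    · exact pvTrans_nonneg row c' c ht
  · intro n
    rw [pvRowA_mem, hempty]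
    simp only [List.not_mem_nil, false_or]
    have hone : (1 : Nat) <<< row.length = 2 ^ row.length := by
      rw [Nat.shiftLeft_eq, one_mul]
    rw [hone]
    simp only [Nat.testBit_lor, Nat.testBit_and, Nat.testBit_shiftRight,
      Nat.testBit_shiftLeft, Nat.testBit_two_pow_sub_one, Bool.or_eq_true,
      Bool.and_eq_true, decide_eq_true_eq]
    constructor
    · rintro ((⟨hm1, hs1⟩ | ⟨⟨hge, hm1, hs1⟩, hlen⟩) | ⟨hmn, hdn⟩)
      · -- beam at n+1 hit a splitter; our column is its left child
        have hmem := (tb (1 + n)).mp hm1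
        have hs := (hsbit (1 + n)).mp hs1
        refine ⟨((1 + n : Nat) : Int), hmem, Or.inl ⟨?_, Or.inl ⟨by push_cast; ring, by push_cast; omega⟩⟩⟩
        simp only [pvHitB, Bool.and_eq_true, Bool.not_eq_true', decide_eq_true_eq,
          Bool.or_eq_false_iff, decide_eq_false_iff_not]
        rw [pvCell_natCast]
        refine ⟨⟨by omega, ?_⟩, hs.2⟩
        have := hs.1; push_cast; omega
      · -- beam at n-1 hit a splitter; our column is its right child
        have hmem := (tb (n - 1)).mp hm1
        have hs := (hsbit (n - 1)).mp hs1
        refine ⟨((n - 1 : Nat) : Int), hmem, Or.inl ⟨?_, Or.inr ⟨by omega, by omega⟩⟩⟩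
        simp only [pvHitB, Bool.and_eq_true, Bool.not_eq_true', decide_eq_true_eq,
          Bool.or_eq_false_iff, decide_eq_false_iff_not]
        rw [pvCell_natCast]
        refine ⟨⟨by omega, ?_⟩, hs.2⟩
        have := hs.1; omega
      · -- beam at n over empty space
        have hmem := (tb n).mp hmn
        have hd := (hdbit n).mp hdn
        refine ⟨((n : Nat) : Int), hmem, Or.inr ⟨rfl, ?_⟩⟩
        simp only [pvDotB, Bool.and_eq_true, Bool.not_eq_true', decide_eq_true_eq,
          Bool.or_eq_false_iff, decide_eq_false_iff_not]
        rw [pvCell_natCast]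
        refine ⟨⟨⟨by omega, ?_⟩, by
          rw [hd.2]; simp⟩, hd.2⟩
        have := hd.1; omega
    · rintro ⟨c, hcmem, (⟨hhit, (⟨hx, h1c⟩ | ⟨hx, hclen⟩)⟩ | ⟨hx, hdot⟩)⟩
      · -- left child: c = n + 1
        have hh : (¬ c < 0 ∧ ¬ (row.length : Int) ≤ c) ∧ pvCell row c = "^" := by
          simpa [pvHitB] using hhit
        have hcn : c = ((1 + n : Nat) : Int) := by push_cast; omega
        rw [hcn] at hcmem hh
        refine Or.inl (Or.inl ⟨(tb (1 + n)).mpr hcmem, (hsbit (1 + n)).mpr ⟨by omega, ?_⟩⟩)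
        rw [pvCell_natCast] at hh
        exact hh.2
      · -- right child: c = n - 1, n ≥ 1
        have hh : (¬ c < 0 ∧ ¬ (row.length : Int) ≤ c) ∧ pvCell row c = "^" := by
          simpa [pvHitB] using hhit
        have hn1 : 1 ≤ n := by omega
        have hcn : c = ((n - 1 : Nat) : Int) := by omega
        rw [hcn] at hcmem hh
        refine Or.inl (Or.inr ⟨⟨hn1, (tb (n - 1)).mpr hcmem, (hsbit (n - 1)).mpr ⟨by omega, ?_⟩⟩, by omega⟩)
        rw [pvCell_natCast] at hh
        exact hh.2
      · -- same column: c = n, a dot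
        have hd : ((¬ c < 0 ∧ ¬ (row.length : Int) ≤ c) ∧ ¬ pvCell row c = "^") ∧ pvCell row c = "." := by
          simpa [pvDotB] using hdot
        have hcn : c = ((n : Nat) : Int) := by omega
        rw [hcn] at hcmem hd
        refine Or.inr ⟨(tb n).mpr hcmem, (hdbit n).mpr ⟨by omega, ?_⟩⟩
        rw [pvCell_natCast] at hd
        exact hd.2

lemma pvEmpty_iff (beams : List Int) (mask : Nat) (h : pvInv beams mask) : beams = [] ↔ mask = 0 := by
  obtain ⟨-, hnn, htb⟩ := h
  constructor
  · intro hnil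
    apply Nat.zero_of_testBit_eq_false
    intro i
    by_contra hb
    have := (htb i).mp (by simpa using hb)
    simp [hnil] at this
  · intro h0
    by_contra hne
    obtain ⟨c, hc⟩ := List.exists_mem_of_ne_nil beams hne
    have h0c := hnn c hc
    have : ((c.toNat : Nat) : Int) ∈ beams := by rwa [Int.toNat_of_nonneg h0c]
    have := (htb c.toNat).mpr this
    simp [h0, Nat.zero_testBit] at this

lemma pvLoopB_zero (matrix : List (List String)) : ∀ (rs : List Int) (cnt : Int), pvLoopB matrix rs cnt 0 = cnt := by
  intro rs cnt
  cases rs with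
  | nil => rfl
  | cons r rs => simp [pvLoopB]

lemma pvLoop_eq (matrix : List (List String)) : ∀ (rs : List Int) (cnt : Int) (beams : List Int) (mask : Nat),
    pvInv beams mask → pvLoopA matrix rs cnt beams = pvLoopB matrix rs cnt mask := by
  intro rs
  induction rs with
  | nil => intro cnt beams mask _; rfl
  | cons r rs ih =>
    intro cnt beams mask hinv
    by_cases hm : mask = 0
    · have hb : beams = [] := (pvEmpty_iff beams mask hinv).mpr hm
      subst hb
      simp [pvLoopA, pvRowA, pvLoopB, hm, PySem.Set.empty, List.isEmpty]
    · have hinv' := pvInv_next ((PySem.List.pyGet? matrix r).getD []) beams mask cnt hinv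
      have hres1 : (pvRowA ((PySem.List.pyGet? matrix r).getD []) cnt beams).1
          = cnt + ((PySem.Int.bitCount ((mask &&& (pvMasksB ((PySem.List.pyGet? matrix r).getD [])).1 : Nat) : Int) : Nat) : Int) := by
        rw [pvRowA, pvRowA_count, count_eq_bitCount _ beams mask hinv]
      have hrhs : pvLoopB matrix (r :: rs) cnt mask
          = pvLoopB matrix rs
              (cnt + ((PySem.Int.bitCount ((mask &&& (pvMasksB ((PySem.List.pyGet? matrix r).getD [])).1 : Nat) : Int) : Nat) : Int))
              (((mask &&& (pvMasksB ((PySem.List.pyGet? matrix r).getD [])).1) >>> 1)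
                ||| (((mask &&& (pvMasksB ((PySem.List.pyGet? matrix r).getD [])).1) <<< 1)
                      &&& ((1 <<< ((PySem.List.pyGet? matrix r).getD []).length) - 1))
                ||| (mask &&& (pvMasksB ((PySem.List.pyGet? matrix r).getD [])).2.1)) := by
        simp only [pvLoopB, if_neg hm]
      rw [hrhs]
      have hlhs : pvLoopA matrix (r :: rs) cnt beams
          = if (pvRowA ((PySem.List.pyGet? matrix r).getD []) cnt beams).2.isEmpty
            then (pvRowA ((PySem.List.pyGet? matrix r).getD []) cnt beams).1
            else pvLoopA matrix rs (pvRowA ((PySem.List.pyGet? matrix r).getD []) cnt beams).1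
                  (pvRowA ((PySem.List.pyGet? matrix r).getD []) cnt beams).2 := rfl
      rw [hlhs]
      by_cases hemp : (pvRowA ((PySem.List.pyGet? matrix r).getD []) cnt beams).2.isEmpty
      · rw [if_pos hemp, hres1]
        have hnil : (pvRowA ((PySem.List.pyGet? matrix r).getD []) cnt beams).2 = [] :=
          List.isEmpty_iff.mp hemp
        have hmz := (pvEmpty_iff _ _ hinv').mp hnil
        rw [hmz, pvLoopB_zero]
      · rw [if_neg hemp, ih _ _ _ hinv', hres1]


-- ===== VERDICT (by name: the statement is the Claim_ definition above) =====
theorem simulate_beam_splitting_spec : Claim_equal_simulate_beam_splitting := by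
  intro matrix _ hpre
  unfold Spec_simulate_beam_splitting simulate_beam_splitting simulate_beam_splitting_alt
  rw [pvFindB_eq]
  cases hfind : pvFindA matrix 0 with
  | none => rfl
  | some rc =>
    obtain ⟨r, c⟩ := rc
    have hc : 0 ≤ c := pvFindA_col_nonneg matrix 0 r c hfind
    apply pvLoop_eq
    refine ⟨List.nodup_singleton c, by simp [hc], fun n => ?_⟩
    rw [Nat.shiftLeft_eq, one_mul, Nat.testBit_two_pow]
    have hofl : PySem.Set.ofList [c] = [c] := rfl
    rw [hofl]
    simp only [List.mem_singleton, decide_eq_true_iff]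
    omega
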